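-- pv_equiv track=rewrite | github.com/ParvinSoni/ArchPLC_Artifacts | NoPCG/2-QX_VGR_M3_RotateCounterclockwise_Q6/getRulesEvaluation0.py | detect_violations
-- ===== SOURCE A (Python) =====
-- def detect_violations(rules_data, samples_list):
--     v_counter = 0
--
--     for r in rules_data:
--         rule_src = r[0][0]
--         rule_target = r[0][1]
--         score = r[1]
--
--         s_counter = 0
--         for sample in samples_list:
--             s_counter += 1
--             ALL_ELEMENTS_EXIST = True
--             for s in rule_src:
--                 if not s in sample:
--                     ALL_ELEMENTS_EXIST = False
--                     break
--
--             if not ALL_ELEMENTS_EXIST: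
--                 continue
--
--             ALL_ELEMENTS_EXIST = True
--             for t in rule_target:
--                 if not t in sample:
--                     ALL_ELEMENTS_EXIST = False
--                     break
--
--             if not ALL_ELEMENTS_EXIST:
--                 v_counter += 1
--     return v_counter
-- ===== SOURCE B (Python) =====
-- def detect_violations(rules_data, samples_list):
--     # Phase 1: collapse the samples into a multiset of distinct membership
--     # signatures (sorted tuple of distinct elements) with multiplicities.
--     groups = {}
--     for sample in samples_list:
--         key = tuple(sorted(set(sample)))
--         groups[key] = groups.get(key, 0) + 1
--     # Phase 2: evaluate each rule once per distinct signature, weighted by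
--     # how many samples share that signature.
--     v_counter = 0
--     for r in rules_data:
--         rule_src = r[0][0]
--         rule_target = r[0][1]
--         score = r[1]
--         for sig, cnt in groups.items():
--             if all(s in sig for s in rule_src) and not all(t in sig for t in rule_target):
--                 v_counter += cnt
--     return v_counter
-- ===== Notes on version B (the rewrite author's own statement) =====
-- stated objective: alternative
-- what changed: B adds a pre-pass that collapses the samples into a dict mapping each distinct membership signature (sorted tuple of distinct elements) to its multiplicity, then evaluates every rule once per distinct signature weighted by that count, instead of A's per-(rule, sample) guard/continue scan.
import Mathlib
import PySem

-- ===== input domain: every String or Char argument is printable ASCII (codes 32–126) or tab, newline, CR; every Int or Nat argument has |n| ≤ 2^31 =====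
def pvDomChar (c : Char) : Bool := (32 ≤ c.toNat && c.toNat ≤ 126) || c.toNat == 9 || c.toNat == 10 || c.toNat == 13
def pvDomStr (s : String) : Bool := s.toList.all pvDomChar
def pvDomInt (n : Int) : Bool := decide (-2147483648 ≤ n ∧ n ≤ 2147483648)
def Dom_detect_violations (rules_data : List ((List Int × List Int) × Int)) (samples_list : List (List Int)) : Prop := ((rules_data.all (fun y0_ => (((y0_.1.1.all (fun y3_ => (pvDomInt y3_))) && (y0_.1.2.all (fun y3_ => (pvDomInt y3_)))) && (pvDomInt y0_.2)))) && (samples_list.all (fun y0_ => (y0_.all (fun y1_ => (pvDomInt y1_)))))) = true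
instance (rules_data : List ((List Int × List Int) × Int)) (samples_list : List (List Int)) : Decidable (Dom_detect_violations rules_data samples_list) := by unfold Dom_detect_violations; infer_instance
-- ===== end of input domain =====

-- B first collapses the samples into a multiset of distinct membership signatures
-- (sorted tuple of distinct elements → multiplicity), then evaluates each rule once
-- per distinct signature, adding the signature's multiplicity on a violation;
-- same value as A's per-(rule, sample) scan.

-- ===== PORT A =====
-- the 'for s in rule_src: if not s in sample: flag=False; break' loop
def pvAllIn (elems : List Int) (sample : List Int) : Bool :=
  match elems with
  | [] => true
  | s :: rest => if !(sample.contains s) then false else pvAllIn rest sample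

def detect_violations (rules_data : List ((List Int × List Int) × Int)) (samples_list : List (List Int)) : Int :=
  rules_data.foldl (fun v_counter r =>
    let rule_src := r.1.1
    let rule_target := r.1.2
    let _score := r.2
    (samples_list.foldl (fun (st : Int × Int) sample =>
      let s_counter := st.1 + 1
      if !(pvAllIn rule_src sample) then (s_counter, st.2)
      else if !(pvAllIn rule_target sample) then (s_counter, st.2 + 1)
      else (s_counter, st.2)) ((0 : Int), v_counter)).2) 0

-- ===== PORT B =====
-- tuple(sorted(set(sample)))
def pvKey (sample : List Int) : List Int :=
  PySem.List.sorted (PySem.Set.ofList sample) (fun x => x) false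

def detect_violations_alt (rules_data : List ((List Int × List Int) × Int)) (samples_list : List (List Int)) : Int :=
  let groups : PySem.Dict (List Int) Int :=
    samples_list.foldl (fun d sample =>
      let key := pvKey sample
      d.insert key (d.getD key 0 + 1)) PySem.Dict.empty
  rules_data.foldl (fun v_counter r =>
    let rule_src := r.1.1
    let rule_target := r.1.2
    let _score := r.2
    groups.items.foldl (fun v p =>
      if rule_src.all (fun s => p.1.contains s) && !(rule_target.all (fun t => p.1.contains t))
      then v + p.2 else v) v_counter) 0

-- ===== PRECONDITION & SPEC =====
def Spec_detect_violations (rules_data : List ((List Int × List Int) × Int)) (samples_list : List (List Int)) (out : Int) : Prop := out = detect_violations_alt rules_data samples_list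
instance (rules_data : List ((List Int × List Int) × Int)) (samples_list : List (List Int)) (out : Int) : Decidable (Spec_detect_violations rules_data samples_list out) := by unfold Spec_detect_violations; infer_instance

-- ===== CLAIM (what is proved, stated in full; the proofs are below) =====
def Claim_equal_detect_violations : Prop := ∀ (rules_data : List ((List Int × List Int) × Int)) (samples_list : List (List Int)), Dom_detect_violations rules_data samples_list → Spec_detect_violations rules_data samples_list (detect_violations rules_data samples_list)

-- ===== LEMMAS AND PROOFS =====

-- the per-(rule, sample) violation indicator, shared reference point for both sides
def pvViol (r : (List Int × List Int) × Int) (sample : List Int) : Bool :=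
  pvAllIn r.1.1 sample && !(pvAllIn r.1.2 sample)

theorem pvAllIn_eq_all (elems sample : List Int) :
    pvAllIn elems sample = elems.all (fun x => sample.contains x) := by
  induction elems with
  | nil => rfl
  | cons s rest ih =>
    by_cases hs : s ∈ sample <;> simp [pvAllIn, ih, hs]

-- the signature preserves membership, hence the violation indicator
theorem contains_pvKey (sample : List Int) (x : Int) :
    (pvKey sample).contains x = sample.contains x := by
  simp [pvKey, PySem.List.mem_sorted, PySem.Set.mem_ofList]

theorem pvViol_pvKey (r : (List Int × List Int) × Int) (sample : List Int) :
    pvViol r (pvKey sample) = pvViol r sample := by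
  simp only [pvViol, pvAllIn_eq_all, contains_pvKey]

-- inner-loop invariant for A: the violation component of the fold is v + Σ indicator
theorem A_inner (r : (List Int × List Int) × Int) (samples : List (List Int)) (p : Int × Int) :
    (samples.foldl (fun (st : Int × Int) sample =>
      let s_counter := st.1 + 1
      if !(pvAllIn r.1.1 sample) then (s_counter, st.2)
      else if !(pvAllIn r.1.2 sample) then (s_counter, st.2 + 1)
      else (s_counter, st.2)) p).2
    = p.2 + (samples.map (fun s => if pvViol r s then (1 : Int) else 0)).sum := by
  induction samples generalizing p with
  | nil => simp
  | cons s rest ih =>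
    rw [List.foldl_cons, ih]
    cases h1 : pvAllIn r.1.1 s
    · simp [pvViol, h1]
    · cases h2 : pvAllIn r.1.2 s
      · simp [pvViol, h1, h2]; ring
      · simp [pvViol, h1, h2]

theorem A_eq_sum (rules : List ((List Int × List Int) × Int)) (samples : List (List Int)) (v0 : Int) :
    rules.foldl (fun v_counter r =>
      (samples.foldl (fun (st : Int × Int) sample =>
        let s_counter := st.1 + 1
        if !(pvAllIn r.1.1 sample) then (s_counter, st.2)
        else if !(pvAllIn r.1.2 sample) then (s_counter, st.2 + 1)
        else (s_counter, st.2)) ((0 : Int), v_counter)).2) v0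
    = v0 + (rules.map (fun r => (samples.map (fun s => if pvViol r s then (1 : Int) else 0)).sum)).sum := by
  induction rules generalizing v0 with
  | nil => simp
  | cons r rest ih =>
    simp only [List.foldl_cons, List.map_cons, List.sum_cons]
    rw [ih, A_inner]; ring

-- B's inner fold over the items list is an indicator-weighted sum
theorem B_items_fold (P : List Int → Bool) (items : List (List Int × Int)) (v0 : Int) :
    items.foldl (fun v p => if P p.1 then v + p.2 else v) v0
    = v0 + (items.map (fun p => if P p.1 then p.2 else 0)).sum := by
  induction items generalizing v0 with
  | nil => simp
  | cons p rest ih =>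
    rw [List.foldl_cons, ih]
    cases h : P p.1
    · simp [h]
    · simp [h]; ring

-- collapsing a list to (distinct value, multiplicity) pairs preserves an indicator sum
theorem sum_ofList_count (ks : List (List Int)) (P : List Int → Bool) :
    ((PySem.Set.ofList ks).map (fun k => if P k then (ks.count k : Int) else 0)).sum
    = (ks.map (fun x => if P x then (1 : Int) else 0)).sum := by
  rw [Finset.sum_list_map_count ks (fun x => if P x then (1 : Int) else 0)]
  rw [← List.sum_toFinset (fun k => if P k then (ks.count k : Int) else 0)
        (PySem.Set.nodup_ofList ks)]
  have hfs : (PySem.Set.ofList ks).toFinset = ks.toFinset := by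
    ext x; simp [PySem.Set.mem_ofList]
  rw [hfs]
  apply Finset.sum_congr rfl
  intro m _
  cases h : P m
  · simp
  · simp only [if_true]
    rw [nsmul_eq_mul, mul_one]
    norm_cast
    simp only [List.count_eq_countP]
    apply List.countP_congr
    intro a _
    simp

-- one rule's weighted sum over the signature groups is its sum over the samples
theorem B_rule_sum (samples : List (List Int)) (r : (List Int × List Int) × Int) :
    (((PySem.Dict.counter (samples.map pvKey)).items).map
      (fun p => if r.1.1.all (fun s => p.1.contains s) && !(r.1.2.all (fun t => p.1.contains t))
        then p.2 else 0)).sum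
    = (samples.map (fun s => if pvViol r s then (1 : Int) else 0)).sum := by
  rw [PySem.Dict.items_counter, List.map_map]
  have h1 : ((fun p : List Int × Int =>
        if r.1.1.all (fun s => p.1.contains s) && !(r.1.2.all (fun t => p.1.contains t))
        then p.2 else 0) ∘ (fun k => (k, ((samples.map pvKey).count k : Int))))
      = fun k => if pvViol r k then ((samples.map pvKey).count k : Int) else 0 := by
    funext k
    simp [Function.comp, pvViol, pvAllIn_eq_all]
  rw [h1, sum_ofList_count (samples.map pvKey) (fun k => pvViol r k), List.map_map]
  congr 1
  apply List.map_congr_left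
  intro s _
  simp [Function.comp, pvViol_pvKey]

-- B equals the double indicator sum
theorem B_eq_sum (rules : List ((List Int × List Int) × Int)) (samples : List (List Int)) :
    detect_violations_alt rules samples
    = (rules.map (fun r => (samples.map (fun s => if pvViol r s then (1 : Int) else 0)).sum)).sum := by
  unfold detect_violations_alt
  have hg : samples.foldl (fun d sample =>
        let key := pvKey sample
        d.insert key (d.getD key 0 + 1)) PySem.Dict.empty
      = PySem.Dict.counter (samples.map pvKey) := by
    rw [← PySem.Dict.foldl_insert_getD_add_one_eq_counter, List.foldl_map]
  simp only [hg]
  have hstep : (fun (v_counter : Int) (r : (List Int × List Int) × Int) =>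
      ((PySem.Dict.counter (samples.map pvKey)).items).foldl (fun v p =>
        if r.1.1.all (fun s => p.1.contains s) && !(r.1.2.all (fun t => p.1.contains t))
        then v + p.2 else v) v_counter)
      = fun v_counter r => v_counter +
        (samples.map (fun s => if pvViol r s then (1 : Int) else 0)).sum := by
    funext v r
    rw [B_items_fold (fun k => r.1.1.all (fun s => k.contains s)
          && !(r.1.2.all (fun t => k.contains t)))]
    rw [B_rule_sum]
  rw [hstep, PySem.List.foldl_add, zero_add]

-- ===== VERDICT (by name: the statement is the Claim_ definition above) =====
theorem detect_violations_spec : Claim_equal_detect_violations := by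
  intro rules samples _
  unfold Spec_detect_violations detect_violations
  rw [A_eq_sum, B_eq_sum, zero_add]
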